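-- pv_equiv track=rewrite | github.com/danielgoes1996/MCP-ERP | core/fiscal_pipeline.py | _should_apply_fallback
-- ===== SOURCE A (Python) =====
-- from typing import Any, Callable, Dict, List, Optional, Tuple
--
-- GENERIC_SAT_PREFIXES = ("601", "602", "603", "604")
--
-- def _should_apply_fallback(sat_code: Optional[str]) -> bool:
--     if not sat_code:
--         return True
--     normalized = sat_code.strip()
--     for prefix in GENERIC_SAT_PREFIXES:
--         if normalized == prefix or normalized.startswith(f"{prefix}."):
--             return True
--     return False
-- ===== SOURCE B (Python) =====
-- GENERIC_SAT_PREFIX_SET = {"601", "602", "603", "604"}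
--
--
-- def _should_apply_fallback(sat_code):
--     if not sat_code:
--         return True
--     head = sat_code.strip().split('.', 1)[0]
--     return head in GENERIC_SAT_PREFIX_SET
-- ===== Notes on version B (the rewrite author's own statement) =====
-- stated objective: simpler
-- what changed: Instead of scanning the four prefixes with per-prefix equality/startswith tests, B extracts the first dot-separated segment of the stripped code once and does a single set-membership lookup.
import Mathlib
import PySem

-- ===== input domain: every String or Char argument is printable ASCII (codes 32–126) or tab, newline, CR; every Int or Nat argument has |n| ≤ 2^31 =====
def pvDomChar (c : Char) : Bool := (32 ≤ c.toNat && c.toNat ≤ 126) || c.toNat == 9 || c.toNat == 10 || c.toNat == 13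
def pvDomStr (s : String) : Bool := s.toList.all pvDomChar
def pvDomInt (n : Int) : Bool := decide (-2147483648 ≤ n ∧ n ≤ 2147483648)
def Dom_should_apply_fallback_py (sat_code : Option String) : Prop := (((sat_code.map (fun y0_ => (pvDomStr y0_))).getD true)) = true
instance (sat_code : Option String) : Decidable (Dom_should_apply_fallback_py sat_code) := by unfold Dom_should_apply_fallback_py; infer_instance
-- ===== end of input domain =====

-- B replaces A's per-prefix equality/startswith loop by extracting the first
-- dot-separated segment once and doing a single set-membership test (simpler).

-- ===== PORT A =====
def GENERIC_SAT_PREFIXES : List String := ["601", "602", "603", "604"]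

-- the 'for prefix in GENERIC_SAT_PREFIXES: if …: return True' loop
def satPrefixLoop (normalized : String) : List String → Bool
  | [] => false
  | p :: rest =>
    if normalized == p || PySem.Str.startswith normalized (p ++ ".") then true
    else satPrefixLoop normalized rest

def should_apply_fallback_py (sat_code : Option String) : Bool :=
  match sat_code with
  | none => true                    -- 'if not sat_code' (None is falsy)
  | some s =>
    if s == "" then true            -- '' is falsy too
    else
      let normalized := PySem.Str.strip s
      satPrefixLoop normalized GENERIC_SAT_PREFIXES

-- ===== PORT B =====
def GENERIC_SAT_PREFIX_SET : PySem.Set String :=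
  PySem.Set.ofList ["601", "602", "603", "604"]

def should_apply_fallback_py_alt (sat_code : Option String) : Bool :=
  match sat_code with
  | none => true
  | some s =>
    if s == "" then true
    else
      let head := ((PySem.Str.splitMax? (PySem.Str.strip s) "." 1).getD []).headD ""
      PySem.Set.contains GENERIC_SAT_PREFIX_SET head

-- ===== PRECONDITION & SPEC =====
def Spec_should_apply_fallback_py (sat_code : Option String) (out : Bool) : Prop := out = should_apply_fallback_py_alt sat_code
instance (sat_code : Option String) (out : Bool) : Decidable (Spec_should_apply_fallback_py sat_code out) := by unfold Spec_should_apply_fallback_py; infer_instance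

-- ===== CLAIM (what is proved, stated in full; the proofs are below) =====
def Claim_equal_should_apply_fallback_py : Prop := ∀ (sat_code : Option String), Dom_should_apply_fallback_py sat_code → Spec_should_apply_fallback_py sat_code (should_apply_fallback_py sat_code)

-- ===== LEMMAS AND PROOFS =====

-- go with maxsplit budget 0 returns immediately: acc.reverse ++ [cur.reverse ++ l]
lemma go_m0 (fuel : Nat) (l cur : List Char) (acc : List (List Char)) :
    PySem.Chars.splitOnMax.go ['.'] fuel 0 l cur acc = acc.reverse ++ [cur.reverse ++ l] := by
  cases fuel with
  | zero => simp [PySem.Chars.splitOnMax.go]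
  | succ f => cases l <;> simp [PySem.Chars.splitOnMax.go]

-- first piece of split(t, '.', 1) is the segment before the first dot
lemma go_head (fuel : Nat) : ∀ (l cur : List Char), l.length < fuel →
    (PySem.Chars.splitOnMax.go ['.'] fuel 1 l cur []).head? =
      some (cur.reverse ++ l.takeWhile (fun c => !decide (c = '.'))) := by
  induction fuel with
  | zero => intro l cur h; omega
  | succ f ih =>
    intro l cur h
    cases l with
    | nil => simp [PySem.Chars.splitOnMax.go]
    | cons c rest =>
      by_cases hc : c = '.'
      · subst hc
        simp only [PySem.Chars.splitOnMax.go, List.isPrefixOf, beq_self_eq_true, Bool.true_and,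
          if_true]
        rw [show (1 : Nat) - 1 = 0 from rfl, go_m0]
        simp
      · have hpre : List.isPrefixOf ['.'] (c :: rest) = false := by
          simp [List.isPrefixOf]; exact fun h' => (hc h'.symm).elim
        simp only [PySem.Chars.splitOnMax.go, hpre]
        rw [if_neg (by omega : ¬ (1 : Nat) = 0)]
        simp only [Bool.false_eq_true, if_false]
        rw [ih rest (c :: cur) (by simpa using Nat.lt_of_succ_lt_succ (by simpa using h))]
        simp [List.takeWhile_cons, hc]

-- head of B's split, at the character level
lemma split_head (t : String) :
    ((PySem.Str.splitMax? t "." 1).getD []).headD "" =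
      String.ofList (t.toList.takeWhile (fun c => !decide (c = '.'))) := by
  have hlen : t.length = t.toList.length := by simp
  have h := go_head (t.length + 1) t.toList []
    (by rw [hlen]; exact Nat.lt_succ_self _)
  simp only [PySem.Str.splitMax?, PySem.Chars.splitMax?, PySem.Chars.splitOnMax]
  norm_num
  rcases hres : PySem.Chars.splitOnMax.go ['.'] (t.length + 1) 1 t.toList [] [] with _ | ⟨x, xs⟩
  · rw [hres] at h; simp at h
  · rw [hres] at h
    simp only [List.head?_cons, Option.some.injEq] at h
    simp [hres, h]

-- the first element a dropWhile leaves in place fails the predicate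
lemma dropWhile_head_false {α : Type} (p : α → Bool) :
    ∀ (l : List α) (c : α) (d : List α), l.dropWhile p = c :: d → p c = false := by
  intro l
  induction l with
  | nil => intro c d h; simp at h
  | cons a as ih =>
    intro c d h
    rw [List.dropWhile_cons] at h
    by_cases ha : p a = true
    · rw [if_pos ha] at h; exact ih c d h
    · rw [if_neg ha] at h
      injection h with h1 h2
      subst h1
      simpa using ha

-- takeWhile over 'p ++ . :: r' when p has no dot
lemma tw_append (p r : List Char) (hp : '.' ∉ p) :
    (p ++ '.' :: r).takeWhile (fun c => !decide (c = '.')) = p := by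
  induction p with
  | nil => simp
  | cons a as ih =>
    have ha : a ≠ '.' := fun h => hp (h ▸ List.mem_cons_self ..)
    simp only [List.cons_append, List.takeWhile_cons]
    simp [ha, ih (fun h => hp (List.mem_cons_of_mem _ h))]

-- A's per-prefix test equals comparing the first segment, for a dot-free prefix
lemma core (p l : List Char) (hp : '.' ∉ p) :
    (decide (l = p) || List.isPrefixOf (p ++ ['.']) l) =
      decide (l.takeWhile (fun c => !decide (c = '.')) = p) := by
  rcases hd : l.dropWhile (fun c => !decide (c = '.')) with _ | ⟨c, d⟩
  · have hl : l.takeWhile (fun c => !decide (c = '.')) = l := by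
      have := List.takeWhile_append_dropWhile (p := fun c => !decide (c = '.')) (l := l)
      rw [hd] at this; simpa using this
    rw [hl]
    have hnd : '.' ∉ l := by
      intro hmem
      rw [← hl] at hmem
      have := List.mem_takeWhile_imp hmem
      simp at this
    have hnp : List.isPrefixOf (p ++ ['.']) l = false := by
      rw [Bool.eq_false_iff]
      intro hpre
      rw [List.isPrefixOf_iff_prefix] at hpre
      rcases hpre with ⟨r, hr⟩
      exact hnd (by rw [← hr]; simp)
    rw [hnp]; simp
  · -- first dot exists: l = takeWhile ++ '.' :: d
    have hc : c = '.' := by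
      have := dropWhile_head_false (fun c => !decide (c = '.')) l c d hd
      simpa using this
    subst hc
    have hl : l = l.takeWhile (fun c => !decide (c = '.')) ++ '.' :: d := by
      conv_lhs => rw [← List.takeWhile_append_dropWhile
        (p := fun c => !decide (c = '.')) (l := l), hd]
    by_cases he : l.takeWhile (fun c => !decide (c = '.')) = p
    · rw [he] at hl
      have hpre : List.isPrefixOf (p ++ ['.']) l = true := by
        rw [List.isPrefixOf_iff_prefix, hl]
        exact ⟨d, by simp⟩
      simp [hpre, he]
    · have h1 : l ≠ p := by
        intro h; apply he
        rw [h, List.takeWhile_eq_self_iff]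
        intro x hx
        have hxd : x ≠ '.' := fun hx' => hp (hx' ▸ hx)
        simp [hxd]
      have h2 : List.isPrefixOf (p ++ ['.']) l = false := by
        rw [Bool.eq_false_iff]
        intro hpre
        rw [List.isPrefixOf_iff_prefix] at hpre
        rcases hpre with ⟨r, hr⟩
        apply he
        rw [← hr, List.append_assoc]
        simpa using tw_append p r hp
      simp [h1, h2, he]

-- string-level form of `core`, for each concrete prefix
lemma coreS (p t : String) (hp : '.' ∉ p.toList) :
    ((t == p) || PySem.Str.startswith t (p ++ ".")) =
      (String.ofList (t.toList.takeWhile (fun c => !decide (c = '.'))) == p) := by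
  have h1 : (t == p) = decide (t.toList = p.toList) := by
    by_cases h : t = p <;> simp [h, String.toList_inj]
  have h2 : (String.ofList (t.toList.takeWhile (fun c => !decide (c = '.'))) == p)
      = decide (t.toList.takeWhile (fun c => !decide (c = '.')) = p.toList) := by
    by_cases h : t.toList.takeWhile (fun c => !decide (c = '.')) = p.toList
    · simp [h, String.ofList_toList]
    · have hne : String.ofList (t.toList.takeWhile (fun c => !decide (c = '.'))) ≠ p :=
        fun hh => h (by simpa using congrArg String.toList hh)
      simp [h, hne]
  have h3 : PySem.Str.startswith t (p ++ ".") =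
      List.isPrefixOf (p.toList ++ ['.']) t.toList := by
    simp [PySem.Str.startswith, PySem.Chars.startswith]
  rw [h1, h2, h3, core p.toList t.toList hp]

-- ===== VERDICT (by name: the statement is the Claim_ definition above) =====
theorem should_apply_fallback_py_spec : Claim_equal_should_apply_fallback_py := by
  intro sat_code _
  unfold Spec_should_apply_fallback_py
  cases sat_code with
  | none => rfl
  | some s =>
    simp only [should_apply_fallback_py, should_apply_fallback_py_alt]
    by_cases hs : s == ""
    · simp [hs]
    · rw [if_neg (by simp_all), if_neg (by simp_all)]
      rw [split_head]
      set t := PySem.Str.strip s with ht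
      have c1 := coreS "601" t (by decide)
      have c2 := coreS "602" t (by decide)
      have c3 := coreS "603" t (by decide)
      have c4 := coreS "604" t (by decide)
      have hset : GENERIC_SAT_PREFIX_SET = ["601", "602", "603", "604"] := by decide
      simp only [GENERIC_SAT_PREFIXES, satPrefixLoop, hset, PySem.Set.contains,
        List.contains_cons, List.contains_nil]
      rw [← c1, ← c2, ← c3, ← c4]
      by_cases h1 : (t == "601" || PySem.Str.startswith t ("601" ++ ".")) = true <;>
        by_cases h2 : (t == "602" || PySem.Str.startswith t ("602" ++ ".")) = true <;>
          by_cases h3 : (t == "603" || PySem.Str.startswith t ("603" ++ ".")) = true <;>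
            by_cases h4 : (t == "604" || PySem.Str.startswith t ("604" ++ ".")) = true <;>
              simp_all
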